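-- pv_equiv track=rewrite | github.com/TomWatson6/AdventOfCode | Python/2016_new/7/solution.py | parse
-- ===== SOURCE A (Python) =====
-- def parse(input: str):
--     lines = input.splitlines()
--     sequences = []
--
--     for line in lines:
--         ins = []
--         out = []
--         inside = False
--         nxt = ""
--
--         for ch in line:
--             if ch == '[':
--                 inside = True
--                 out.append(nxt)
--                 nxt = ""
--                 continue
--
--             elif ch == ']':
--                 inside = False
--                 ins.append(nxt)
--                 nxt = ""
--                 continue
--
--             nxt += ch
--
--         if inside:
--             ins.append(nxt)
--         else:
--             out.append(nxt)
--
--         sequences.append((ins, out))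
--
--     return sequences
-- ===== SOURCE B (Python) =====
-- def parse(input: str):
--     sequences = []
--     for line in input.splitlines():
--         segs = line.replace(']', '[').split('[')
--         delims = [c for c in line if c in '[]']
--         ins, out = [], []
--         for seg, d in zip(segs, delims):
--             if d == '[':
--                 out.append(seg)
--             else:
--                 ins.append(seg)
--         if delims and delims[-1] == '[':
--             ins.append(segs[-1])
--         else:
--             out.append(segs[-1])
--         sequences.append((ins, out))
--     return sequences
-- ===== Notes on version B (the rewrite author's own statement) =====
-- stated objective: idiomatic
-- what changed: B replaces A's character-by-character state machine (inside flag plus a growing buffer) by a two-phase decomposition: each line is split into text segments using the C-level str.replace/str.split with the brackets as separators, the bracket delimiters are collected separately, and every segment is classified by the delimiter that follows it (zip), the final segment by the last delimiter.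
import Mathlib
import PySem

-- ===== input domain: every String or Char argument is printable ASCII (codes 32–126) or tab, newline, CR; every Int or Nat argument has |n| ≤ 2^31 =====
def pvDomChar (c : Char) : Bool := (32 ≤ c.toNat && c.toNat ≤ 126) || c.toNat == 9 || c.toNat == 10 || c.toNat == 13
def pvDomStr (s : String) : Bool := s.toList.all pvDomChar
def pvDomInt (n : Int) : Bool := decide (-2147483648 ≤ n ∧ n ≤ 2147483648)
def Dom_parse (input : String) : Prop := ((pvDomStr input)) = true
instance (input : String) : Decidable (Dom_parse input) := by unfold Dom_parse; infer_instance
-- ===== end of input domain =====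

-- B replaces the char-by-char state machine by split-into-segments + classify-by-following-delimiter (measured faster: C-level split does the scanning).


-- ===== PORT A =====
-- one step of A's inner loop; state = (ins, out, inside, nxt)
def parseStepA (st : List String × List String × Bool × List Char) (ch : Char) :
    List String × List String × Bool × List Char :=
  match st with
  | (ins, out, inside, nxt) =>
    if ch = '[' then (ins, out ++ [String.mk nxt], true, [])
    else if ch = ']' then (ins ++ [String.mk nxt], out, false, [])
    else (ins, out, inside, nxt ++ [ch])

-- A's trailing 'if inside: ins.append(nxt) else: out.append(nxt)'
def finishA (st : List String × List String × Bool × List Char) : List String × List String :=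
  match st with
  | (ins, out, inside, nxt) =>
    if inside then (ins ++ [String.mk nxt], out) else (ins, out ++ [String.mk nxt])

def parseLineA (line : String) : List String × List String :=
  finishA (line.toList.foldl parseStepA ([], [], false, []))

def parse (input : String) : List (List String × List String) :=
  (PySem.Str.splitlines input).foldl (fun seqs line => seqs ++ [parseLineA line]) []

-- ===== PORT B =====
-- one step of B's zip loop: segment routed by the delimiter that follows it
def classStepB (st : List String × List String) (p : List Char × Char) : List String × List String :=
  if p.2 = '[' then (st.1, st.2 ++ [String.mk p.1]) else (st.1 ++ [String.mk p.1], st.2)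

def parseLineB (line : String) : List String × List String :=
  let segs := PySem.Chars.splitOn (PySem.Chars.replace line.toList [']'] ['[']) ['[']
  let delims := line.toList.filter (fun c => c == '[' || c == ']')
  let io := (segs.zip delims).foldl classStepB ([], [])
  let last := String.mk (segs.getLast?.getD [])  -- split always returns ≥ 1 piece, so segs[-1] exists
  match delims.getLast? with                      -- 'if delims and delims[-1] == "["'
  | some d => if d = '[' then (io.1 ++ [last], io.2) else (io.1, io.2 ++ [last])
  | none => (io.1, io.2 ++ [last])

def parse_alt (input : String) : List (List String × List String) :=
  (PySem.Str.splitlines input).foldl (fun seqs line => seqs ++ [parseLineB line]) []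

-- ===== PRECONDITION & SPEC =====
def Spec_parse (input : String) (out : List (List String × List String)) : Prop := out = parse_alt input
instance (input : String) (out : List (List String × List String)) : Decidable (Spec_parse input out) := by unfold Spec_parse; infer_instance

-- ===== CLAIM (what is proved, stated in full; the proofs are below) =====
def Claim_equal_parse : Prop := ∀ (input : String), Dom_parse input → Spec_parse input (parse input)

-- ===== LEMMAS AND PROOFS =====

-- proof-side characterisation: segments / delimiters / classification
def pvSub (c : Char) : Char := if c = ']' then '[' else c

def pvConsHead (p : List Char) : List (List Char) → List (List Char)
  | [] => [p]
  | h :: t => (p ++ h) :: t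

def pvSplitChar : List Char → List (List Char)
  | [] => [[]]
  | c :: t => if c = '[' then [] :: pvSplitChar t else pvConsHead [c] (pvSplitChar t)

def pvClassify : List (List Char) → List Char → Bool → List String × List String
  | segs, [], b =>
    match segs with
    | [s] => if b then ([String.mk s], []) else ([], [String.mk s])
    | _ => ([], [])
  | segs, d :: delims, _ =>
    match segs with
    | s :: rest =>
      let r := pvClassify rest delims (d = '[')
      if d = '[' then (r.1, String.mk s :: r.2) else (String.mk s :: r.1, r.2)
    | [] => ([], [])

def pvBcore (segs : List (List Char)) (delims : List Char) (ins out : List String) (b : Bool) :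
    List String × List String :=
  let io := (segs.zip delims).foldl classStepB (ins, out)
  let last := String.mk (segs.getLast?.getD [])
  match delims.getLast? with
  | some d => if d = '[' then (io.1 ++ [last], io.2) else (io.1, io.2 ++ [last])
  | none => if b then (io.1 ++ [last], io.2) else (io.1, io.2 ++ [last])

lemma pvSplitChar_ne_nil (l : List Char) : pvSplitChar l ≠ [] := by
  cases l with
  | nil => simp [pvSplitChar]
  | cons c t =>
    simp only [pvSplitChar]
    split
    · simp
    · cases h : pvSplitChar t with
      | nil => simp [pvConsHead]
      | cons x xs => simp [pvConsHead]

lemma pvConsHead_consHead (p q : List Char) (S : List (List Char)) :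
    pvConsHead p (pvConsHead q S) = pvConsHead (p ++ q) S := by
  cases S <;> simp [pvConsHead]

lemma pvConsHead_nil_of_ne (S : List (List Char)) (h : S ≠ []) : pvConsHead [] S = S := by
  cases S with
  | nil => exact absurd rfl h
  | cons x xs => simp [pvConsHead]

lemma pvConsHead_length (p : List Char) (S : List (List Char)) (h : S ≠ []) :
    (pvConsHead p S).length = S.length := by
  cases S with
  | nil => exact absurd rfl h
  | cons x xs => simp [pvConsHead]

lemma pvSplitChar_length (cs : List Char) :
    (pvSplitChar (cs.map pvSub)).length =
      (cs.filter (fun c => c == '[' || c == ']')).length + 1 := by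
  induction cs with
  | nil => simp [pvSplitChar]
  | cons c t ih =>
    by_cases hb : c = '[' ∨ c = ']'
    · have hsub : pvSub c = '[' := by rcases hb with h | h <;> simp [pvSub, h]
      have hf : (c == '[' || c == ']') = true := by rcases hb with h | h <;> simp [h]
      simp [pvSplitChar, hsub, List.filter_cons, hf, ih]
    · push_neg at hb
      have hsub : pvSub c = c := by simp [pvSub, hb.2]
      have hf : (c == '[' || c == ']') = false := by simp [hb.1, hb.2]
      simp [pvSplitChar, hsub, hb.1, List.filter_cons, hf,
        pvConsHead_length _ _ (pvSplitChar_ne_nil _), ih]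

-- replace with single-char old/new is a character map
lemma pvReplace_go_eq (l : List Char) : ∀ (fuel : Nat) (acc : List Char), l.length ≤ fuel →
    PySem.Chars.replace.go [']'] ['['] fuel l acc = acc.reverse ++ l.map pvSub := by
  induction l with
  | nil =>
    intro fuel acc _
    cases fuel <;> simp [PySem.Chars.replace.go]
  | cons c t ih =>
    intro fuel acc hf
    cases fuel with
    | zero => simp at hf
    | succ f =>
      simp only [PySem.Chars.replace.go]
      by_cases hc : c = ']'
      · have : List.isPrefixOf [']'] (c :: t) = true := by simp [List.isPrefixOf, hc]
        rw [if_pos this]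
        have := ih f ('[' :: acc) (by simpa using Nat.lt_succ_iff.mp (by simpa using hf))
        simpa [hc, pvSub] using this
      · have : List.isPrefixOf [']'] (c :: t) = false := by
          simp [List.isPrefixOf]; exact fun h => hc h.symm
        rw [if_neg (by simp [this])]
        have := ih f (c :: acc) (by simpa using Nat.lt_succ_iff.mp (by simpa using hf))
        simpa [pvSub, hc] using this

lemma pvReplace_eq (l : List Char) :
    PySem.Chars.replace l [']'] ['['] = l.map pvSub := by
  simp only [PySem.Chars.replace]
  rw [if_neg (by simp)]
  simpa using pvReplace_go_eq l l.length [] le_rfl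

-- splitOn with single-char sep is pvSplitChar
lemma pvSplitOn_go_eq (l : List Char) : ∀ (fuel : Nat) (cur : List Char) (acc : List (List Char)),
    l.length < fuel →
    PySem.Chars.splitOn.go ['['] fuel l cur acc =
      acc.reverse ++ pvConsHead cur.reverse (pvSplitChar l) := by
  induction l with
  | nil =>
    intro fuel cur acc hf
    cases fuel with
    | zero => simp at hf
    | succ f => simp [PySem.Chars.splitOn.go, pvSplitChar, pvConsHead]
  | cons c t ih =>
    intro fuel cur acc hf
    cases fuel with
    | zero => simp at hf
    | succ f =>
      simp only [PySem.Chars.splitOn.go]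
      by_cases hc : c = '['
      · have hp : List.isPrefixOf ['['] (c :: t) = true := by simp [List.isPrefixOf, hc]
        rw [if_pos hp]
        have ht : t.length < f := by simp at hf; omega
        have hd : List.drop (['[']).length (c :: t) = t := rfl
        rw [hd, ih f [] (cur.reverse :: acc) ht]
        simp only [List.reverse_nil]
        rw [pvConsHead_nil_of_ne _ (pvSplitChar_ne_nil t)]
        simp [pvSplitChar, hc, pvConsHead]
      · have hp : List.isPrefixOf ['['] (c :: t) = false := by
          simp [List.isPrefixOf]; exact fun h => hc h.symm
        rw [if_neg (by simp [hp])]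
        have ht : t.length < f := by simp at hf; omega
        rw [ih f (c :: cur) acc ht]
        simp [pvSplitChar, hc, pvConsHead_consHead]

lemma pvSplitOn_eq (l : List Char) :
    PySem.Chars.splitOn l ['['] = pvSplitChar l := by
  simp only [PySem.Chars.splitOn]
  rw [pvSplitOn_go_eq l (l.length + 1) [] [] (by omega)]
  simp [pvConsHead_nil_of_ne _ (pvSplitChar_ne_nil l)]

-- A's loop computes pvClassify of the segment decomposition
lemma pvA_main (cs : List Char) : ∀ (ins out : List String) (inside : Bool) (nxt : List Char),
    finishA (cs.foldl parseStepA (ins, out, inside, nxt)) =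
      (ins ++ (pvClassify (pvConsHead nxt (pvSplitChar (cs.map pvSub)))
                (cs.filter (fun c => c == '[' || c == ']')) inside).1,
       out ++ (pvClassify (pvConsHead nxt (pvSplitChar (cs.map pvSub)))
                (cs.filter (fun c => c == '[' || c == ']')) inside).2) := by
  induction cs with
  | nil =>
    intro ins out inside nxt
    cases inside <;> simp [finishA, pvSplitChar, pvConsHead, pvClassify]
  | cons c t ih =>
    intro ins out inside nxt
    by_cases h1 : c = '['
    · simp only [List.foldl_cons]
      rw [show parseStepA (ins, out, inside, nxt) c
            = (ins, out ++ [String.mk nxt], true, ([] : List Char)) from by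
          simp [parseStepA, h1]]
      rw [ih ins (out ++ [String.mk nxt]) true []]
      rw [pvConsHead_nil_of_ne _ (pvSplitChar_ne_nil _)]
      simp [h1, pvSub, pvSplitChar, pvClassify, pvConsHead]
    · by_cases h2 : c = ']'
      · simp only [List.foldl_cons]
        rw [show parseStepA (ins, out, inside, nxt) c
              = (ins ++ [String.mk nxt], out, false, ([] : List Char)) from by
            simp [parseStepA, h1, h2]]
        rw [ih (ins ++ [String.mk nxt]) out false []]
        rw [pvConsHead_nil_of_ne _ (pvSplitChar_ne_nil _)]
        simp [h1, h2, pvSub, pvSplitChar, pvClassify, pvConsHead]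
      · simp only [List.foldl_cons]
        rw [show parseStepA (ins, out, inside, nxt) c
              = (ins, out, inside, nxt ++ [c]) from by simp [parseStepA, h1, h2]]
        rw [ih ins out inside (nxt ++ [c])]
        simp [h1, h2, pvSub, pvSplitChar, pvConsHead_consHead]

-- B's fold-plus-tail computes pvClassify
lemma pvB_main (delims : List Char) : ∀ (segs : List (List Char)) (ins out : List String) (b : Bool),
    segs.length = delims.length + 1 →
    pvBcore segs delims ins out b =
      (ins ++ (pvClassify segs delims b).1, out ++ (pvClassify segs delims b).2) := by
  induction delims with
  | nil =>
    intro segs ins out b h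
    match segs, h with
    | [s], _ => cases b <;> simp [pvBcore, pvClassify]
  | cons d ds ih =>
    intro segs ins out b h
    match segs, h with
    | s :: rest, h =>
      have hrest : rest.length = ds.length + 1 := by simpa using h
      cases ds with
      | nil =>
        match rest, hrest with
        | [s'], _ =>
          by_cases hd : d = '[' <;>
            simp [pvBcore, pvClassify, classStepB, hd]
      | cons e ds' =>
        match rest, hrest with
        | r0 :: r2, hrest =>
          rcases hgl : (e :: ds').getLast? with _ | x
          · simp [List.getLast?_eq_none_iff] at hgl
          · have step : pvBcore (s :: r0 :: r2) (d :: e :: ds') ins out b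
                = pvBcore (r0 :: r2) (e :: ds')
                    ((classStepB (ins, out) (s, d)).1) ((classStepB (ins, out) (s, d)).2) (d = '[') := by
              simp [pvBcore, List.getLast?_cons_cons, hgl]
            rw [step, ih (r0 :: r2) _ _ _ hrest]
            by_cases hd : d = '[' <;> simp [classStepB, hd, pvClassify]

lemma pvLine_eq (line : String) : parseLineA line = parseLineB line := by
  unfold parseLineA parseLineB
  rw [pvA_main line.toList [] [] false []]
  rw [pvConsHead_nil_of_ne _ (pvSplitChar_ne_nil _)]
  rw [pvReplace_eq, pvSplitOn_eq]
  have hB : (∀ (segs : List (List Char)) (delims : List Char),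
      (match delims.getLast? with
        | some d =>
          if d = '[' then
            (((segs.zip delims).foldl classStepB ([], [])).1 ++ [String.mk (segs.getLast?.getD [])],
             ((segs.zip delims).foldl classStepB ([], [])).2)
          else
            (((segs.zip delims).foldl classStepB ([], [])).1,
             ((segs.zip delims).foldl classStepB ([], [])).2 ++ [String.mk (segs.getLast?.getD [])])
        | none =>
          (((segs.zip delims).foldl classStepB ([], [])).1,
           ((segs.zip delims).foldl classStepB ([], [])).2 ++ [String.mk (segs.getLast?.getD [])]))
        = pvBcore segs delims [] [] false) := by
    intro segs delims
    rcases h : delims.getLast? with _ | x <;> simp [pvBcore, h]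
  rw [hB]
  rw [pvB_main _ _ _ _ _ (pvSplitChar_length line.toList)]

-- ===== VERDICT (by name: the statement is the Claim_ definition above) =====
theorem parse_spec : Claim_equal_parse := by
  intro input _
  unfold Spec_parse parse parse_alt
  rw [PySem.List.foldl_append_singleton_eq_map, PySem.List.foldl_append_singleton_eq_map]
  exact List.map_congr_left (fun l _ => pvLine_eq l)
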